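-- pv_equiv track=rewrite | github.com/MagicBowen/dogent | dogent/features/doc_templates.py | _extract_intro
-- ===== SOURCE A (Python) =====
-- def _extract_intro(content: str) -> str:
--     lines = content.splitlines()
--     capture = False
--     captured: list[str] = []
--     for line in lines:
--         stripped = line.strip()
--         if stripped.startswith("## ") and capture:
--             break
--         if stripped == "## Introduction":
--             capture = True
--             continue
--         if capture and stripped:
--             captured.append(stripped)
--     if captured:
--         return " ".join(captured).strip()
--     fallback = [line.strip() for line in lines[:5] if line.strip()]
--     return " ".join(fallback).strip()
-- ===== SOURCE B (Python) =====
-- def _extract_intro(content: str) -> str: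
--     lines = content.splitlines()
--     # Segment the whole document into a section table: (heading, body-lines) pairs,
--     # with a None-headed preamble section; then look up the Introduction section.
--     sections: list[tuple[str | None, list[str]]] = []
--     heading: str | None = None
--     body: list[str] = []
--     for line in lines:
--         stripped = line.strip()
--         if stripped.startswith("## "):
--             sections.append((heading, body))
--             heading, body = stripped, []
--         elif stripped:
--             body.append(stripped)
--     sections.append((heading, body))
--     captured = next((b for h, b in sections if h == "## Introduction"), [])
--     if not captured:
--         captured = [line.strip() for line in lines[:5] if line.strip()]
--     return " ".join(captured).strip()
-- ===== Notes on version B (the rewrite author's own statement) =====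
-- stated objective: alternative
-- what changed: Replaced A's flag-driven scan by a different data structure: one grouping pass segments the whole document into a table of (heading, body) sections with no Introduction-specific logic, then the answer is a lookup of the first section headed '## Introduction'; the first-five-lines fallback is unchanged.
import Mathlib
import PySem

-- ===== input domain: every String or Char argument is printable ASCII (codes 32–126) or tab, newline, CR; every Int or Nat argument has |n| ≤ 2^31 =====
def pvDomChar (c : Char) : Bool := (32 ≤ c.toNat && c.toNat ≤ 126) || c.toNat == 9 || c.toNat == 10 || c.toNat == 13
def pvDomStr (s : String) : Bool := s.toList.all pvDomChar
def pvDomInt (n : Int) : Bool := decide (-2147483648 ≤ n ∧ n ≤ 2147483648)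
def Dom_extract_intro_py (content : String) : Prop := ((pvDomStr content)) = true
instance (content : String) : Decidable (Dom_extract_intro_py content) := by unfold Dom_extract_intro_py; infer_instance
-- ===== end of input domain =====

-- B replaces A's flag-driven scan by a section table: segment the document into (heading, body) pairs, then look up "## Introduction" (objective: alternative).


-- ===== PORT A =====
-- A's for-loop with `break`, as structural recursion over the lines with state (capture, captured)
def pvALoop : List String → Bool → List String → List String
  | [], _, captured => captured
  | line :: rest, capture, captured =>
    let stripped := PySem.Str.strip line
    if PySem.Str.startswith stripped "## " && capture then captured
    else if stripped == "## Introduction" then pvALoop rest true captured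
    else if capture && stripped != "" then pvALoop rest capture (captured ++ [stripped])
    else pvALoop rest capture captured

def extract_intro_py (content : String) : String :=
  let lines := PySem.Str.splitlines content
  let captured := pvALoop lines false []
  if captured ≠ [] then PySem.Str.strip (PySem.Str.join " " captured)
  else
    let fallback := ((lines.take 5).map PySem.Str.strip).filter (fun s => s != "")
    PySem.Str.strip (PySem.Str.join " " fallback)

-- ===== PORT B =====
-- B's grouping loop: segment the lines into (heading, body) sections, preamble headed `none`
def pvBGroup : List String → Option String → List String → List (Option String × List String)
  | [], heading, body => [(heading, body)]
  | line :: rest, heading, body =>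
    let stripped := PySem.Str.strip line
    if PySem.Str.startswith stripped "## " then (heading, body) :: pvBGroup rest (some stripped) []
    else if stripped != "" then pvBGroup rest heading (body ++ [stripped])
    else pvBGroup rest heading body

-- the `next(... for h, b in sections ...)` lookup: body of the first section headed "## Introduction"
def pvBPick : List (Option String × List String) → List String
  | [] => []
  | (h, b) :: rest => if h == some "## Introduction" then b else pvBPick rest

def extract_intro_py_alt (content : String) : String :=
  let lines := PySem.Str.splitlines content
  let sections := pvBGroup lines none []
  let captured := pvBPick sections
  let captured :=
    if captured = [] then ((lines.take 5).map PySem.Str.strip).filter (fun s => s != "")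
    else captured
  PySem.Str.strip (PySem.Str.join " " captured)

-- ===== PRECONDITION & SPEC =====
def Spec_extract_intro_py (content : String) (out : String) : Prop := out = extract_intro_py_alt content
instance (content : String) (out : String) : Decidable (Spec_extract_intro_py content out) := by unfold Spec_extract_intro_py; infer_instance

-- ===== CLAIM (what is proved, stated in full; the proofs are below) =====
def Claim_equal_extract_intro_py : Prop := ∀ (content : String), Dom_extract_intro_py content → Spec_extract_intro_py content (extract_intro_py content)

-- ===== LEMMAS AND PROOFS =====

-- proof helper: the stripped non-empty lines up to the next "## " heading
def pvColl : List String → List String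
  | [] => []
  | line :: rest =>
    let stripped := PySem.Str.strip line
    if PySem.Str.startswith stripped "## " then []
    else if stripped != "" then stripped :: pvColl rest
    else pvColl rest

theorem pvIntro_startswith (s : String) (h : PySem.Str.strip s = "## Introduction") :
    PySem.Chars.startswith (PySem.Chars.strip s.toList) ['#', '#', ' '] = true := by
  have : PySem.Chars.strip s.toList = "## Introduction".toList := by
    rw [← PySem.Str.toList_strip, h]
  rw [this]; decide

-- once capture is on, A collects exactly the current section's remaining body
theorem pvALoop_true (lines : List String) :
    ∀ acc, pvALoop lines true acc = acc ++ pvColl lines := by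
  induction lines with
  | nil => intro acc; simp [pvALoop, pvColl]
  | cons line rest ih =>
    intro acc
    by_cases h1 : PySem.Chars.startswith (PySem.Chars.strip line.toList) ['#', '#', ' '] = true
    · simp [pvALoop, pvColl, h1]
    · have h2 : ¬ PySem.Str.strip line = "## Introduction" :=
        fun he => h1 (pvIntro_startswith line he)
      by_cases h3 : PySem.Str.strip line = ""
      · simp [pvALoop, pvColl, h3, ih,
          (by decide : PySem.Chars.startswith [] ['#', '#', ' '] = false)]
      · simp [pvALoop, pvColl, h1, h2, h3, ih]

-- in the section currently headed "## Introduction", the lookup returns its body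
theorem pvBPick_intro (lines : List String) :
    ∀ body, pvBPick (pvBGroup lines (some "## Introduction") body) = body ++ pvColl lines := by
  induction lines with
  | nil => intro body; simp [pvBGroup, pvBPick, pvColl]
  | cons line rest ih =>
    intro body
    by_cases h1 : PySem.Chars.startswith (PySem.Chars.strip line.toList) ['#', '#', ' '] = true
    · simp [pvBGroup, pvBPick, pvColl, h1]
    · by_cases h3 : PySem.Str.strip line = ""
      · simp [pvBGroup, pvColl, h3, ih,
          (by decide : PySem.Chars.startswith [] ['#', '#', ' '] = false)]
      · simp [pvBGroup, pvColl, h1, h3, ih]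

-- before capture: A's scan equals segmenting under any non-Introduction heading and looking up
theorem pvALoop_false (lines : List String) :
    ∀ (h : Option String) (body : List String), h ≠ some "## Introduction" →
      pvALoop lines false [] = pvBPick (pvBGroup lines h body) := by
  induction lines with
  | nil =>
    intro h body hh
    have hne : (h == some "## Introduction") = false := beq_eq_false_iff_ne.mpr hh
    simp [pvALoop, pvBGroup, pvBPick, hne]
  | cons line rest ih =>
    intro h body hh
    have hne : (h == some "## Introduction") = false := beq_eq_false_iff_ne.mpr hh
    by_cases hS : PySem.Chars.startswith (PySem.Chars.strip line.toList) ['#', '#', ' '] = true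
    · by_cases h2 : PySem.Str.strip line = "## Introduction"
      · simp [pvALoop, pvBGroup, pvBPick, h2, hne, pvALoop_true, pvBPick_intro,
          (by decide : PySem.Chars.startswith
            ['#', '#', ' ', 'I', 'n', 't', 'r', 'o', 'd', 'u', 'c', 't', 'i', 'o', 'n']
            ['#', '#', ' '] = true)]
      · have hs : some (PySem.Str.strip line) ≠ some "## Introduction" := by simpa using h2
        simp [pvALoop, pvBGroup, pvBPick, hS, h2, hne]
        exact ih _ _ hs
    · have h2 : ¬ PySem.Str.strip line = "## Introduction" :=
        fun he => hS (pvIntro_startswith line he)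
      by_cases h3 : PySem.Str.strip line = ""
      · simp [pvALoop, pvBGroup, h3,
          (by decide : PySem.Chars.startswith [] ['#', '#', ' '] = false)]
        exact ih _ _ hh
      · simp [pvALoop, pvBGroup, hS, h2, h3]
        exact ih _ _ hh

-- ===== VERDICT =====
theorem extract_intro_py_spec : Claim_equal_extract_intro_py := by
  unfold Claim_equal_extract_intro_py Spec_extract_intro_py
  intro content _
  unfold extract_intro_py extract_intro_py_alt
  simp only [pvALoop_false (PySem.Str.splitlines content) none [] (by simp)]
  cases hc : pvBPick (pvBGroup (PySem.Str.splitlines content) none []) with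
  | nil => simp
  | cons x xs => simp
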